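-- pv_equiv track=rewrite | github.com/sungyeong98/leetcode | 2527-find-xor-beauty-of-array/2527-find-xor-beauty-of-array.py | xorBeauty
-- ===== SOURCE A (Python) =====
-- from typing import List
--
-- def xorBeauty(nums: List[int]) -> int:
--     n=len(nums)
--     result=0
--
--     for bit in range(32):
--         bit_mask=1<<bit
--         count=0
--
--         for i in range(n):
--             for j in range(n):
--                 if (nums[i]|nums[j])&bit_mask:
--                     count+=1
--
--         cnt=0
--         for k in range(n):
--             if nums[k]&bit_mask:
--                 cnt+=1
--
--         total_cnt=count*cnt
--         if total_cnt%2==1: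
--             result|=bit_mask
--     return result
-- ===== SOURCE B (Python) =====
-- from typing import List
--
-- def xorBeauty(nums: List[int]) -> int:
--     # XOR beauty identity: for each bit, the number of (i,j,k) triples with
--     # ((nums[i]|nums[j]) & nums[k]) bit set is odd iff the count of elements
--     # with that bit set is odd, so the answer is the XOR of all elements,
--     # restricted to the 32 bits the problem considers.
--     acc = 0
--     for x in nums:
--         acc ^= x
--     return acc & 0xFFFFFFFF
-- ===== Notes on version B (the rewrite author's own statement) =====
-- stated objective: faster
-- what changed: Replaces the 32x(n^2+n) per-bit triple-counting loops by a single XOR fold over the list masked to 32 bits, using the identity that the per-bit triple count is odd iff the per-bit element count is odd.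
import Mathlib
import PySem

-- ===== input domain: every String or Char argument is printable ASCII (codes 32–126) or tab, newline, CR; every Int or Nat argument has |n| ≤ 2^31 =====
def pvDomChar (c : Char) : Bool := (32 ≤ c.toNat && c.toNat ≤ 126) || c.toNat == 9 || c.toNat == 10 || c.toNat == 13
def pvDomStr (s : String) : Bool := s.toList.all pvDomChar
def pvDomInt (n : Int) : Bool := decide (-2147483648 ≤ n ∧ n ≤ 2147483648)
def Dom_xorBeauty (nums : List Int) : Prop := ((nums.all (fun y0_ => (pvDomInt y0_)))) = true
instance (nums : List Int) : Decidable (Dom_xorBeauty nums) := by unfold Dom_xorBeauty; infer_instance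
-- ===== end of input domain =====

-- B replaces A's 32×(n²+n) per-bit triple-count parity loops by a single XOR fold
-- masked to the low 32 bits (objective: faster, asymptotic).

-- ===== PORT A =====
def xorBeauty (nums : List Int) : Int :=
  let n : Int := PySem.List.len nums
  (PySem.List.pyRange 0 32).foldl (fun result bit =>
    -- bit ∈ range(32) is nonnegative, so `bit.toNat` is exactly Python's shift amount
    let bit_mask : Int := 1 <<< bit.toNat
    let count : Int :=
      (PySem.List.pyRange 0 n).foldl (fun count i =>
        (PySem.List.pyRange 0 n).foldl (fun count j =>
          if PySem.Int.band (PySem.Int.bor (PySem.List.pyGetD nums i 0) (PySem.List.pyGetD nums j 0)) bit_mask ≠ 0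
          then count + 1 else count) count) 0
    let cnt : Int :=
      (PySem.List.pyRange 0 n).foldl (fun cnt k =>
        if PySem.Int.band (PySem.List.pyGetD nums k 0) bit_mask ≠ 0 then cnt + 1 else cnt) 0
    let total_cnt := count * cnt
    if PySem.Int.mod total_cnt 2 = 1 then PySem.Int.bor result bit_mask else result) 0

-- ===== PORT B =====
def xorBeauty_alt (nums : List Int) : Int :=
  PySem.Int.band (nums.foldl (fun acc x => PySem.Int.bxor acc x) 0) 4294967295

-- ===== PRECONDITION & SPEC =====
def Spec_xorBeauty (nums : List Int) (out : Int) : Prop := out = xorBeauty_alt nums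
instance (nums : List Int) (out : Int) : Decidable (Spec_xorBeauty nums out) := by unfold Spec_xorBeauty; infer_instance

-- ===== CLAIM (what is proved, stated in full; the proofs are below) =====
def Claim_equal_xorBeauty : Prop := ∀ (nums : List Int), Dom_xorBeauty nums → Spec_xorBeauty nums (xorBeauty nums)

-- ===== LEMMAS AND PROOFS =====

def pvBit (x : Int) (k : Nat) : Bool := decide (x / 2 ^ k % 2 = 1)

theorem pv_add_or (m n : Nat) (h : m &&& n = 0) : m + n = m ||| n := by
  induction m using Nat.strong_induction_on generalizing n with
  | _ m ih =>
    rcases Nat.eq_zero_or_pos m with hm | hm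
    · subst hm; simp
    · have h2 : m / 2 &&& n / 2 = 0 := by rw [← Nat.and_div_two, h]
      have ih2 := ih (m / 2) (Nat.div_lt_self hm (by norm_num)) (n / 2) h2
      have hb : ¬(m % 2 = 1 ∧ n % 2 = 1) := by
        intro ⟨h1, h2'⟩
        have hc := congrArg (fun x => x.testBit 0) h
        simp [Nat.testBit_zero, h1, h2'] at hc
      have h0 : decide ((m ||| n) % 2 = 1) = (decide (m % 2 = 1) || decide (n % 2 = 1)) := by
        simpa [Nat.testBit_zero] using Nat.testBit_or m n 0
      have hor2 : (m ||| n) / 2 = m / 2 ||| n / 2 := Nat.or_div_two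
      have h0' : ((m ||| n) % 2 = 1) ↔ (m % 2 = 1 ∨ n % 2 = 1) := by
        simpa using h0
      omega

theorem pv_sub_and (v m : Nat) : v - (v &&& m) = v ^^^ (v &&& m) := by
  have hd : (v ^^^ (v &&& m)) &&& (v &&& m) = 0 := by
    apply Nat.eq_of_testBit_eq
    intro i
    simp only [Nat.testBit_and, Nat.testBit_xor, Nat.zero_testBit]
    cases v.testBit i <;> cases m.testBit i <;> rfl
  have hor : (v ^^^ (v &&& m)) ||| (v &&& m) = v := by
    apply Nat.eq_of_testBit_eq
    intro i
    simp only [Nat.testBit_and, Nat.testBit_xor, Nat.testBit_or]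
    cases v.testBit i <;> cases m.testBit i <;> rfl
  have := pv_add_or _ _ hd
  rw [hor] at this
  omega

theorem pvBit_natCast (n : Nat) (k : Nat) : pvBit (n : Int) k = n.testBit k := by
  rw [pvBit, Nat.testBit_eq_decide_div_mod_eq]
  have he : ((2 : Int)) ^ k = ((2 ^ k : Nat) : Int) := by push_cast; ring
  rw [he, ← Int.natCast_ediv, decide_eq_decide]
  omega

theorem pv_neg_ediv (u : Nat) (k : Nat) :
    (-(u : Int) - 1) / 2 ^ k = -((u / 2 ^ k : Nat) : Int) - 1 := by
  have hp : (0 : Int) < 2 ^ k := by positivity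
  have hs : ((u % 2 ^ k : Nat) : Int) < (2 : Int) ^ k := by
    have : u % 2 ^ k < 2 ^ k := Nat.mod_lt _ (by positivity)
    calc ((u % 2 ^ k : Nat) : Int) < ((2 ^ k : Nat) : Int) := by exact_mod_cast this
      _ = (2 : Int) ^ k := by push_cast; ring
  have hu : (u : Int) = (2 : Int) ^ k * ((u / 2 ^ k : Nat) : Int) + ((u % 2 ^ k : Nat) : Int) := by
    exact_mod_cast (Nat.div_add_mod u (2 ^ k)).symm
  have h := (Int.ediv_emod_unique (a := -(u : Int) - 1) (b := 2 ^ k)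
      (q := -((u / 2 ^ k : Nat) : Int) - 1) (r := 2 ^ k - 1 - ((u % 2 ^ k : Nat) : Int))
      hp).mpr ?_
  · exact h.1
  · refine ⟨by rw [hu]; ring, by omega, by omega⟩

theorem pvBit_negSucc (u : Nat) (k : Nat) : pvBit (-(u : Int) - 1) k = ! u.testBit k := by
  rw [pvBit, Nat.testBit_eq_decide_div_mod_eq, pv_neg_ediv]
  by_cases h : u / 2 ^ k % 2 = 1
  · rw [decide_eq_true h, Bool.not_true, decide_eq_false (by omega)]
  · rw [decide_eq_false h, Bool.not_false, decide_eq_true (by omega)]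
theorem pv_int_cases (x : Int) : (∃ n : Nat, x = (n : Int)) ∨ (∃ n : Nat, x = -(n : Int) - 1) := by
  by_cases h : 0 ≤ x
  · exact Or.inl ⟨x.toNat, by omega⟩
  · exact Or.inr ⟨(-x - 1).toNat, by omega⟩

theorem pv_cast_div_mod (u k : Nat) :
    (u : Int) = (2 : Int) ^ k * ((u / 2 ^ k : Nat) : Int) + ((u % 2 ^ k : Nat) : Int) := by
  exact_mod_cast (Nat.div_add_mod u (2 ^ k)).symm

theorem pv_neg_lt' (u : Nat) : ¬ ((1 : Int) ≤ -(u : Int)) := by omega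

theorem pv_bxor_nn (m n : Nat) : PySem.Int.bxor (m : Int) (n : Int) = ((m ^^^ n : Nat) : Int) := by
  simp [PySem.Int.bxor, Int.toNat_natCast]

theorem pv_bxor_np (m v : Nat) :
    PySem.Int.bxor (m : Int) (-(v : Int) - 1) = -((m ^^^ v : Nat) : Int) - 1 := by
  simp [PySem.Int.bxor, Int.toNat_natCast, pv_neg_lt']

theorem pv_bxor_pn (u n : Nat) :
    PySem.Int.bxor (-(u : Int) - 1) (n : Int) = -((u ^^^ n : Nat) : Int) - 1 := by
  simp [PySem.Int.bxor, Int.toNat_natCast, pv_neg_lt']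

theorem pv_bxor_pp (u v : Nat) :
    PySem.Int.bxor (-(u : Int) - 1) (-(v : Int) - 1) = ((u ^^^ v : Nat) : Int) := by
  simp [PySem.Int.bxor, Int.toNat_natCast, pv_neg_lt']

theorem pv_bor_nn (m n : Nat) : PySem.Int.bor (m : Int) (n : Int) = ((m ||| n : Nat) : Int) := by
  simp [PySem.Int.bor, Int.toNat_natCast]

theorem pv_bor_np (m v : Nat) :
    PySem.Int.bor (m : Int) (-(v : Int) - 1) = -((v - (v &&& m) : Nat) : Int) - 1 := by
  simp [PySem.Int.bor, Int.toNat_natCast, pv_neg_lt']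

theorem pv_bor_pn (u n : Nat) :
    PySem.Int.bor (-(u : Int) - 1) (n : Int) = -((u - (u &&& n) : Nat) : Int) - 1 := by
  simp [PySem.Int.bor, Int.toNat_natCast, pv_neg_lt']

theorem pv_bor_pp (u v : Nat) :
    PySem.Int.bor (-(u : Int) - 1) (-(v : Int) - 1) = -((u &&& v : Nat) : Int) - 1 := by
  simp [PySem.Int.bor, Int.toNat_natCast, pv_neg_lt']

theorem pv_band_pn (u n : Nat) :
    PySem.Int.band (-(u : Int) - 1) (n : Int) = ((n - (n &&& u) : Nat) : Int) := by
  simp [PySem.Int.band, Int.toNat_natCast, pv_neg_lt']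

theorem pvBit_bxor (x y : Int) (k : Nat) :
    pvBit (PySem.Int.bxor x y) k = (pvBit x k).xor (pvBit y k) := by
  rcases pv_int_cases x with ⟨m, rfl⟩ | ⟨u, rfl⟩ <;> rcases pv_int_cases y with ⟨n, rfl⟩ | ⟨v, rfl⟩
  · rw [pv_bxor_nn, pvBit_natCast, pvBit_natCast, pvBit_natCast, Nat.testBit_xor]
  · rw [pv_bxor_np, pvBit_negSucc, pvBit_natCast, pvBit_negSucc, Nat.testBit_xor]
    cases m.testBit k <;> cases v.testBit k <;> rfl
  · rw [pv_bxor_pn, pvBit_negSucc, pvBit_negSucc, pvBit_natCast, Nat.testBit_xor]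
    cases u.testBit k <;> cases n.testBit k <;> rfl
  · rw [pv_bxor_pp, pvBit_natCast, pvBit_negSucc, pvBit_negSucc, Nat.testBit_xor]
    cases u.testBit k <;> cases v.testBit k <;> rfl

theorem pv_testBit_sub_and (v m i : Nat) :
    (v - (v &&& m)).testBit i = (v.testBit i && !(m.testBit i)) := by
  rw [pv_sub_and, Nat.testBit_xor, Nat.testBit_and]
  cases v.testBit i <;> cases m.testBit i <;> rfl

theorem pvBit_bor (x y : Int) (k : Nat) :
    pvBit (PySem.Int.bor x y) k = (pvBit x k || pvBit y k) := by
  rcases pv_int_cases x with ⟨m, rfl⟩ | ⟨u, rfl⟩ <;> rcases pv_int_cases y with ⟨n, rfl⟩ | ⟨v, rfl⟩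
  · rw [pv_bor_nn, pvBit_natCast, pvBit_natCast, pvBit_natCast, Nat.testBit_or]
  · rw [pv_bor_np, pvBit_negSucc, pvBit_natCast, pvBit_negSucc, pv_testBit_sub_and]
    cases m.testBit k <;> cases v.testBit k <;> rfl
  · rw [pv_bor_pn, pvBit_negSucc, pvBit_negSucc, pvBit_natCast, pv_testBit_sub_and]
    cases u.testBit k <;> cases n.testBit k <;> rfl
  · rw [pv_bor_pp, pvBit_negSucc, pvBit_negSucc, pvBit_negSucc, Nat.testBit_and]
    cases u.testBit k <;> cases v.testBit k <;> rfl
theorem pv_cast_two_pow (k : Nat) : ((2 ^ k : Nat) : Int) = (2 : Int) ^ k := by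
  push_cast; ring

theorem pv_band_two_pow (x : Int) (k : Nat) :
    PySem.Int.band x ((2 : Int) ^ k) = if pvBit x k then (2 : Int) ^ k else 0 := by
  rcases pv_int_cases x with ⟨m, rfl⟩ | ⟨u, rfl⟩
  · rw [← pv_cast_two_pow, PySem.Int.band_of_nonneg (by positivity) (by positivity),
      Int.toNat_natCast, Int.toNat_natCast, Nat.and_two_pow, pvBit_natCast]
    cases m.testBit k <;> simp [pv_cast_two_pow]
  · rw [← pv_cast_two_pow, pv_band_pn, Nat.and_comm, Nat.and_two_pow, pvBit_negSucc]
    cases u.testBit k <;> simp [pv_cast_two_pow]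

theorem pv_bor_two_pow (r : Int) (k : Nat) (h0 : 0 ≤ r) (h : r < 2 ^ k) :
    PySem.Int.bor r ((2 : Int) ^ k) = r + 2 ^ k := by
  rw [← pv_cast_two_pow, PySem.Int.bor_of_nonneg h0 (by positivity), Int.toNat_natCast]
  have hlt : r.toNat < 2 ^ k := by
    have := pv_cast_two_pow k; omega
  have hand : r.toNat &&& 2 ^ k = 0 := by
    rw [Nat.and_two_pow, Nat.testBit_lt_two_pow hlt]; simp
  rw [← pv_add_or _ _ hand]
  push_cast
  omega

theorem pv_band_mask (x : Int) (k : Nat) :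
    PySem.Int.band x ((2 : Int) ^ k - 1) = x % 2 ^ k := by
  have h1 : (1 : Nat) ≤ 2 ^ k := Nat.one_le_two_pow
  have hc : ((2 ^ k - 1 : Nat) : Int) = (2 : Int) ^ k - 1 := by
    rw [Nat.cast_sub h1, pv_cast_two_pow]; norm_num
  rcases pv_int_cases x with ⟨m, rfl⟩ | ⟨u, rfl⟩
  · rw [← hc, PySem.Int.band_of_nonneg (by positivity) (by positivity),
      Int.toNat_natCast, Int.toNat_natCast, Nat.and_two_pow_sub_one_eq_mod]
    rw [Int.natCast_emod, pv_cast_two_pow]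
  · rw [← hc, pv_band_pn, Nat.and_comm, Nat.and_two_pow_sub_one_eq_mod]
    have hs : u % 2 ^ k < 2 ^ k := Nat.mod_lt _ (by positivity)
    have hdm := pv_cast_div_mod u k
    have hed := pv_neg_ediv u k
    rw [Int.emod_def, hed]
    have hcast : ((2 ^ k - 1 - u % 2 ^ k : Nat) : Int)
        = (2 : Int) ^ k - 1 - ((u % 2 ^ k : Nat) : Int) := by
      rw [Nat.cast_sub (by omega), Nat.cast_sub h1, pv_cast_two_pow]; norm_num
    rw [hcast]
    linear_combination hdm
theorem pv_emod_step (x : Int) (k : Nat) :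
    x % 2 ^ (k + 1) = x % 2 ^ k + (if pvBit x k then (2 : Int) ^ k else 0) := by
  have hp : (0 : Int) < 2 ^ k := by positivity
  have h1 : (2 : Int) ^ k * (x / 2 ^ k) + x % 2 ^ k = x := Int.mul_ediv_add_emod x (2 ^ k)
  have h2 : (2 : Int) * (x / 2 ^ k / 2) + x / 2 ^ k % 2 = x / 2 ^ k := Int.mul_ediv_add_emod (x / 2 ^ k) 2
  have hr2 : 0 ≤ x / 2 ^ k % 2 ∧ x / 2 ^ k % 2 < 2 := ⟨Int.emod_nonneg _ (by norm_num), Int.emod_lt_of_pos _ (by norm_num)⟩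
  have hr1 : 0 ≤ x % 2 ^ k ∧ x % 2 ^ k < 2 ^ k := ⟨Int.emod_nonneg _ (by omega), Int.emod_lt_of_pos _ hp⟩
  have hx : x = (2 ^ k * (x / 2 ^ k % 2) + x % 2 ^ k) + 2 ^ (k + 1) * (x / 2 ^ k / 2) := by
    rw [pow_succ]
    linear_combination -h1 - (2 : Int) ^ k * h2
  have hsmall : 0 ≤ 2 ^ k * (x / 2 ^ k % 2) + x % 2 ^ k ∧
      2 ^ k * (x / 2 ^ k % 2) + x % 2 ^ k < 2 ^ (k + 1) := by
    constructor
    · have := mul_nonneg (le_of_lt hp) hr2.1; omega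
    · have : 2 ^ k * (x / 2 ^ k % 2) ≤ 2 ^ k * 1 := by
        apply mul_le_mul_of_nonneg_left (by omega) (le_of_lt hp)
      rw [pow_succ]; nlinarith
  have hL : x % 2 ^ (k + 1) = 2 ^ k * (x / 2 ^ k % 2) + x % 2 ^ k := by
    conv_lhs => rw [hx]
    rw [Int.add_mul_emod_self_left, Int.emod_eq_of_lt hsmall.1 hsmall.2]
  rw [hL]
  unfold pvBit
  rcases Int.emod_two_eq (x / 2 ^ k) with h | h <;> simp [h] <;> ring

theorem pvBit_zero (k : Nat) : pvBit 0 k = false := by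
  unfold pvBit
  norm_num

theorem pvBit_foldl_bxor (l : List Int) (a : Int) (k : Nat) :
    pvBit (l.foldl (fun acc x => PySem.Int.bxor acc x) a) k
      = (pvBit a k).xor (decide (l.countP (fun x => pvBit x k) % 2 = 1)) := by
  induction l generalizing a with
  | nil => simp
  | cons x l ih =>
    rw [List.foldl_cons, ih, pvBit_bxor, List.countP_cons]
    by_cases hx : pvBit x k <;> by_cases ha : pvBit a k <;>
      by_cases hc : l.countP (fun x => pvBit x k) % 2 = 1 <;>
      simp [hx, ha, hc, Nat.add_mod] <;> omega

theorem pv_foldl_add_ite (l : List Int) (p : Int → Bool) (A B s : Int) :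
    l.foldl (fun c x => c + (if p x then A else B)) s
      = s + (l.countP p : Int) * A + ((l.length : Int) - (l.countP p : Int)) * B := by
  induction l generalizing s with
  | nil => simp
  | cons x l ih =>
    rw [List.foldl_cons, ih, List.countP_cons, List.length_cons]
    by_cases hx : p x <;> simp [hx] <;> ring
theorem pv_cnt_eval (nums : List Int) (k : Nat) :
    (PySem.List.pyRange 0 (PySem.List.len nums)).foldl
      (fun cnt j => if PySem.Int.band (PySem.List.pyGetD nums j 0) ((2 : Int) ^ k) ≠ 0 then cnt + 1 else cnt) 0
    = ((nums.countP (fun x => pvBit x k) : Nat) : Int) := by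
  have hcnt := PySem.List.foldl_pyRange_pyGetD nums 0
      (fun (c : Int) (x : Int) => if PySem.Int.band x ((2 : Int) ^ k) ≠ 0 then c + 1 else c) (0 : Int) (a := 0) (le_refl 0)
  rw [show ((PySem.List.pyRange 0 (PySem.List.len nums)).foldl
      (fun cnt j => if PySem.Int.band (PySem.List.pyGetD nums j 0) ((2 : Int) ^ k) ≠ 0 then cnt + 1 else cnt) 0) =
      nums.foldl (fun (c : Int) (x : Int) => if PySem.Int.band x ((2 : Int) ^ k) ≠ 0 then c + 1 else c) 0 from hcnt]
  have hfun : (fun (c : Int) (x : Int) => if PySem.Int.band x ((2 : Int) ^ k) ≠ 0 then c + 1 else c)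
      = fun c x => if (pvBit x k) = true then c + 1 else c := by
    funext c x
    rw [pv_band_two_pow]
    by_cases h : pvBit x k <;> simp [h, (by positivity : (0 : Int) < 2 ^ k).ne']
  rw [hfun, PySem.List.foldl_count_if]
  simp

theorem pv_count_eval (nums : List Int) (k : Nat) :
    (PySem.List.pyRange 0 (PySem.List.len nums)).foldl
      (fun count i => (PySem.List.pyRange 0 (PySem.List.len nums)).foldl
        (fun count j => if PySem.Int.band (PySem.Int.bor (PySem.List.pyGetD nums i 0) (PySem.List.pyGetD nums j 0)) ((2 : Int) ^ k) ≠ 0 then count + 1 else count) count) 0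
    = ((nums.countP (fun x => pvBit x k) : Nat) : Int) * (nums.length : Int)
      + ((nums.length : Int) - ((nums.countP (fun x => pvBit x k) : Nat) : Int)) * ((nums.countP (fun x => pvBit x k) : Nat) : Int) := by
  have hout := PySem.List.foldl_pyRange_pyGetD nums 0
      (fun (acc : Int) (x : Int) => (PySem.List.pyRange 0 (PySem.List.len nums)).foldl
        (fun c j => if PySem.Int.band (PySem.Int.bor x (PySem.List.pyGetD nums j 0)) ((2 : Int) ^ k) ≠ 0 then c + 1 else c) acc) (0 : Int) (a := 0) (le_refl 0)
  rw [show ((PySem.List.pyRange 0 (PySem.List.len nums)).foldl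
      (fun count i => (PySem.List.pyRange 0 (PySem.List.len nums)).foldl
        (fun count j => if PySem.Int.band (PySem.Int.bor (PySem.List.pyGetD nums i 0) (PySem.List.pyGetD nums j 0)) ((2 : Int) ^ k) ≠ 0 then count + 1 else count) count) 0) =
      nums.foldl (fun (acc : Int) (x : Int) => (PySem.List.pyRange 0 (PySem.List.len nums)).foldl
        (fun c j => if PySem.Int.band (PySem.Int.bor x (PySem.List.pyGetD nums j 0)) ((2 : Int) ^ k) ≠ 0 then c + 1 else c) acc) 0 from hout]
  have hfun : (fun (acc : Int) (x : Int) => (PySem.List.pyRange 0 (PySem.List.len nums)).foldl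
        (fun c j => if PySem.Int.band (PySem.Int.bor x (PySem.List.pyGetD nums j 0)) ((2 : Int) ^ k) ≠ 0 then c + 1 else c) acc)
      = fun acc x => acc + (if pvBit x k then (nums.length : Int) else ((nums.countP (fun y => pvBit y k) : Nat) : Int)) := by
    funext acc x
    have hin := PySem.List.foldl_pyRange_pyGetD nums 0
        (fun (c : Int) (y : Int) => if PySem.Int.band (PySem.Int.bor x y) ((2 : Int) ^ k) ≠ 0 then c + 1 else c) acc (a := 0) (le_refl 0)
    rw [show ((PySem.List.pyRange 0 (PySem.List.len nums)).foldl
        (fun c j => if PySem.Int.band (PySem.Int.bor x (PySem.List.pyGetD nums j 0)) ((2 : Int) ^ k) ≠ 0 then c + 1 else c) acc) =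
        nums.foldl (fun (c : Int) (y : Int) => if PySem.Int.band (PySem.Int.bor x y) ((2 : Int) ^ k) ≠ 0 then c + 1 else c) acc from hin]
    have hf2 : (fun (c : Int) (y : Int) => if PySem.Int.band (PySem.Int.bor x y) ((2 : Int) ^ k) ≠ 0 then c + 1 else c)
        = fun c y => if (pvBit x k || pvBit y k) = true then c + 1 else c := by
      funext c y
      rw [pv_band_two_pow, pvBit_bor]
      by_cases h : (pvBit x k || pvBit y k) <;> simp [h, (by positivity : (0 : Int) < 2 ^ k).ne']
    rw [hf2, PySem.List.foldl_count_if]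
    by_cases hx : pvBit x k
    · simp [hx, List.countP_true]
    · simp [hx]
  rw [hfun, pv_foldl_add_ite]
  simp

theorem pv_parity_cond (c L : Nat) (hc : c ≤ L) :
    (PySem.Int.mod (((c : Int) * (L : Int) + ((L : Int) - (c : Int)) * (c : Int)) * (c : Int)) 2 = 1)
      ↔ (c % 2 = 1) := by
  rw [PySem.Int.mod_eq_emod_of_pos (by norm_num)]
  obtain ⟨d, rfl⟩ := Nat.exists_eq_add_of_le hc
  have he : ((c : Int) * ((c + d : Nat) : Int) + (((c + d : Nat) : Int) - (c : Int)) * (c : Int)) * (c : Int)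
      = (c : Int) ^ 3 + 2 * ((c : Int) ^ 2 * (d : Int)) := by push_cast; ring
  rw [he, Int.add_mul_emod_self_left]
  have h3 : ((c : Int) ^ 3) % 2 = (c : Int) % 2 := by
    rcases Int.even_or_odd (c : Int) with ⟨m, hm⟩ | ⟨m, hm⟩
    · rw [hm, show (m + m) ^ 3 = 2 * (4 * m ^ 3) by ring, Int.mul_emod_right,
        show m + m = 2 * m by ring, Int.mul_emod_right]
    · rw [hm, show (2 * m + 1) ^ 3 = 1 + 2 * (4 * m ^ 3 + 6 * m ^ 2 + 3 * m) by ring,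
        Int.add_mul_emod_self_left, show 2 * m + 1 = 1 + 2 * m by ring, Int.add_mul_emod_self_left]
  rw [h3]
  omega
theorem pvBit_X (nums : List Int) (k : Nat) :
    pvBit (nums.foldl (fun acc x => PySem.Int.bxor acc x) 0) k
      = decide (nums.countP (fun x => pvBit x k) % 2 = 1) := by
  rw [pvBit_foldl_bxor, pvBit_zero, Bool.false_xor]

theorem pv_loop (nums : List Int) (K : Nat) :
    (PySem.List.pyRange 0 (K : Int)).foldl (fun result bit =>
      let bit_mask : Int := 1 <<< bit.toNat
      let count : Int :=
        (PySem.List.pyRange 0 (PySem.List.len nums)).foldl (fun count i =>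
          (PySem.List.pyRange 0 (PySem.List.len nums)).foldl (fun count j =>
            if PySem.Int.band (PySem.Int.bor (PySem.List.pyGetD nums i 0) (PySem.List.pyGetD nums j 0)) bit_mask ≠ 0
            then count + 1 else count) count) 0
      let cnt : Int :=
        (PySem.List.pyRange 0 (PySem.List.len nums)).foldl (fun cnt k =>
          if PySem.Int.band (PySem.List.pyGetD nums k 0) bit_mask ≠ 0 then cnt + 1 else cnt) 0
      let total_cnt := count * cnt
      if PySem.Int.mod total_cnt 2 = 1 then PySem.Int.bor result bit_mask else result) 0
    = (nums.foldl (fun acc x => PySem.Int.bxor acc x) 0) % 2 ^ K := by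
  induction K with
  | zero =>
    rw [show ((0 : Nat) : Int) = 0 by norm_num, show PySem.List.pyRange 0 0 = [] by decide]
    simp
  | succ K ih =>
    rw [show ((K + 1 : Nat) : Int) = (K : Int) + 1 by push_cast; ring,
      PySem.List.pyRange_one_succ_right (by positivity), List.foldl_append, ih,
      List.foldl_cons, List.foldl_nil]
    simp only [Int.toNat_natCast]
    simp only [show ((1 <<< K : Nat) : Int) = (2 : Int) ^ K from by rw [Nat.shiftLeft_eq]; push_cast; ring]
    rw [pv_cnt_eval nums K, pv_count_eval nums K]
    have hparity := pv_parity_cond (nums.countP (fun x => pvBit x K)) nums.length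
      List.countP_le_length
    have hX := pvBit_X nums K
    have hr1 : 0 ≤ (nums.foldl (fun acc x => PySem.Int.bxor acc x) 0) % 2 ^ K :=
      Int.emod_nonneg _ (by positivity)
    have hr2 : (nums.foldl (fun acc x => PySem.Int.bxor acc x) 0) % 2 ^ K < 2 ^ K :=
      Int.emod_lt_of_pos _ (by positivity)
    by_cases h : nums.countP (fun x => pvBit x K) % 2 = 1
    · rw [if_pos (hparity.mpr h), pv_bor_two_pow _ _ hr1 hr2, pv_emod_step _ K,
        if_pos (by rw [hX]; exact decide_eq_true h)]
    · rw [if_neg (fun hx => h (hparity.mp hx)), pv_emod_step _ K,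
        if_neg (by rw [hX]; simpa using h)]
      ring

-- ===== VERDICT (by name: the statement is the Claim_ definition above) =====
theorem xorBeauty_spec : Claim_equal_xorBeauty := by
  intro nums _
  unfold Spec_xorBeauty
  show xorBeauty nums = xorBeauty_alt nums
  have h := pv_loop nums 32
  rw [show ((32 : Nat) : Int) = (32 : Int) by norm_num] at h
  unfold xorBeauty xorBeauty_alt
  rw [show (4294967295 : Int) = (2 : Int) ^ 32 - 1 by norm_num, pv_band_mask]
  exact h
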